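-- pv_equiv track=rewrite | github.com/PythonCisco/clase | clases/decimooctava.py | varias
-- ===== SOURCE A (Python) =====
-- def varias(lst, num):
--  if num == 1:
--   return lst
--  else:
--   a = []
--   for i in lst:
--    a += [i+j for j in varias(lst, num-1)]
--   return a
-- ===== SOURCE B (Python) =====
-- def varias(lst, num):
--     cur = lst
--     for _ in range(num - 1):
--         cur = [i + j for i in lst for j in cur]
--     return cur
-- ===== Notes on version B (the rewrite author's own statement) =====
-- stated objective: faster
-- what changed: Replaces the recursion that recomputes varias(lst,num-1) once per element of lst with a bottom-up loop that builds each level exactly once.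
import Mathlib
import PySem

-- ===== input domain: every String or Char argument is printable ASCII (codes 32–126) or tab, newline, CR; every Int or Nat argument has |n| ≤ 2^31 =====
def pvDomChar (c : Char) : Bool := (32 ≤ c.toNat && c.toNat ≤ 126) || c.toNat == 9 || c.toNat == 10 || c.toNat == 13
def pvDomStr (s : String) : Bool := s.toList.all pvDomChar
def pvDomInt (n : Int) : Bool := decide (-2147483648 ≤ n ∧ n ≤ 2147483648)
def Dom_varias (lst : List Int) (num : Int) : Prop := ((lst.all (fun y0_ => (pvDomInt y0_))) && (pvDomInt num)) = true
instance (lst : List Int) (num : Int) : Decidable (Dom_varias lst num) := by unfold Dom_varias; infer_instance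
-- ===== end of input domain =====

-- B builds each level once in a bottom-up loop instead of A's recursion that recomputes
-- varias(lst, num-1) for every element of lst (asymptotically faster; measured by the check).

-- ===== PORT A =====
-- A's recursion on the Int `num`, run with fuel num.toNat; inside Pre_ (num ≥ 1, or lst = [])
-- the fuel is never exhausted, so this is exact there (Python diverges for num ≤ 0, lst ≠ []).
def variasFuel (lst : List Int) : Int → Nat → List Int
  | _, 0 => []
  | num, fuel+1 =>
    if num == 1 then lst
    else lst.foldl (fun a i => a ++ (variasFuel lst (num-1) fuel).map (fun j => i + j)) []

def varias (lst : List Int) (num : Int) : List Int := variasFuel lst num num.toNat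

-- ===== PORT B =====
def varias_alt (lst : List Int) (num : Int) : List Int :=
  (PySem.List.pyRange 0 (num - 1) 1).foldl
    (fun cur _ => lst.flatMap (fun i => cur.map (fun j => i + j))) lst

-- ===== PRECONDITION & SPEC =====
-- Pre_ excludes num ≤ 0 with non-empty lst, where Python A recurses forever (RecursionError).
def Pre_varias (lst : List Int) (num : Int) : Prop := 1 ≤ num ∨ lst = []
instance (lst : List Int) (num : Int) : Decidable (Pre_varias lst num) := by unfold Pre_varias; infer_instance
def pvWitness_varias : List Int × Int := ([1, 2], 3)

def Spec_varias (lst : List Int) (num : Int) (out : List Int) : Prop := out = varias_alt lst num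
instance (lst : List Int) (num : Int) (out : List Int) : Decidable (Spec_varias lst num out) := by unfold Spec_varias; infer_instance

-- ===== CLAIM (what is proved, stated in full; the proofs are below) =====
def Claim_equal_varias : Prop := ∀ (lst : List Int) (num : Int), Dom_varias lst num → Pre_varias lst num → Spec_varias lst num (varias lst num)

-- ===== LEMMAS AND PROOFS =====

-- one level of A's loop is B's step function
def variasStep (lst cur : List Int) : List Int := lst.flatMap (fun i => cur.map (fun j => i + j))

theorem foldl_step_eq_iterate (lst : List Int) (l : List Int) (init : List Int) :
    l.foldl (fun cur _ => variasStep lst cur) init = (variasStep lst)^[l.length] init := by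
  induction l generalizing init with
  | nil => simp
  | cons x xs ih => simp [List.foldl_cons, ih, Function.iterate_succ_apply]

theorem variasFuel_eq_iterate (lst : List Int) (k : Nat) :
    variasFuel lst ((k : Int) + 1) (k + 1) = (variasStep lst)^[k] lst := by
  induction k with
  | zero => simp [variasFuel]
  | succ n ih =>
    have hne : ((n : Int) + 1 + 1 == 1) = false := by simp; omega
    rw [Function.iterate_succ_apply']
    show variasFuel lst ((n : Int) + 1 + 1) (n + 1 + 1) = _
    rw [variasFuel, hne]
    have h1 : (n : Int) + 1 + 1 - 1 = (n : Int) + 1 := by ring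
    rw [h1, ih, if_neg (by simp)]
    rw [PySem.List.foldl_append_eq_flatMap]
    simp [variasStep]

theorem varias_alt_eq_iterate (lst : List Int) (num : Int) :
    varias_alt lst num = (variasStep lst)^[(num - 1).toNat] lst := by
  unfold varias_alt
  rw [show (fun cur (_ : Int) => lst.flatMap fun i => cur.map fun j => i + j)
        = (fun cur _ => variasStep lst cur) from rfl,
      foldl_step_eq_iterate, PySem.List.length_pyRange_one]
  norm_num

theorem varias_nil (num : Int) : varias [] num = [] := by
  unfold varias
  cases h : num.toNat with
  | zero => simp [variasFuel]
  | succ n => simp [variasFuel]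

theorem step_nil_iterate (k : Nat) : (variasStep [])^[k] [] = [] := by
  induction k with
  | zero => rfl
  | succ n ih => rw [Function.iterate_succ_apply', ih]; rfl

-- ===== VERDICT (by name: the statement is the Claim_ definition above) =====
theorem varias_spec : Claim_equal_varias := by
  intro lst num _ hpre
  unfold Spec_varias
  rcases hpre with h1 | hnil
  · obtain ⟨k, hk⟩ : ∃ k : Nat, num = (k : Int) + 1 :=
      ⟨(num - 1).toNat, by omega⟩
    subst hk
    unfold varias
    have ht : ((k : Int) + 1).toNat = k + 1 := by omega
    rw [ht, variasFuel_eq_iterate, varias_alt_eq_iterate]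
    congr 1
    omega
  · subst hnil
    rw [varias_nil, varias_alt_eq_iterate, step_nil_iterate]
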